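-- pv_equiv track=rewrite | github.com/romiteld/ZohoDealCreation | app/webhook_handlers.py | should_invalidate_cache
-- ===== SOURCE A (Python) =====
-- from typing import Dict, Any, List, Optional, Set
--
-- def should_invalidate_cache(changed_files: List[str]) -> Dict[str, bool]:
--     """
--     Determine which cache patterns should be invalidated based on changed files.
--
--     Args:
--         changed_files: List of file paths that changed
--
--     Returns:
--         Dictionary mapping invalidation reasons to whether they should trigger
--     """
--     invalidation_needed = {
--         "manifest": False,
--         "js_files": False,
--         "html_files": False,
--         "config": False,
--         "icons": False,
--         "addin_assets": False
--     }
--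
--     for file_path in changed_files:
--         file_path_lower = file_path.lower()
--
--         # Check for manifest changes
--         if "manifest.xml" in file_path_lower:
--             invalidation_needed["manifest"] = True
--             invalidation_needed["addin_assets"] = True
--
--         # Check for JavaScript changes
--         elif file_path_lower.endswith(('.js',)):
--             invalidation_needed["js_files"] = True
--             if "addin/" in file_path_lower:
--                 invalidation_needed["addin_assets"] = True
--             if "config.js" in file_path_lower:
--                 invalidation_needed["config"] = True
--
--         # Check for HTML changes
--         elif file_path_lower.endswith(('.html',)):
--             invalidation_needed["html_files"] = True
--             if "addin/" in file_path_lower: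
--                 invalidation_needed["addin_assets"] = True
--
--         # Check for icon changes
--         elif file_path_lower.endswith(('.png', '.jpg', '.jpeg', '.ico')):
--             invalidation_needed["icons"] = True
--             invalidation_needed["addin_assets"] = True
--
--         # Check for CSS changes
--         elif file_path_lower.endswith(('.css',)):
--             invalidation_needed["addin_assets"] = True
--
--     return invalidation_needed
-- ===== SOURCE B (Python) =====
-- def should_invalidate_cache(changed_files):
--     """Determine which cache patterns should be invalidated based on changed files."""
--     lows = [f.lower() for f in changed_files]
--
--     def manifest(f):
--         return "manifest.xml" in f
--
--     def js(f):
--         return f.endswith(".js") and not manifest(f)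
--
--     def html(f):
--         return f.endswith(".html") and not manifest(f)
--
--     def config(f):
--         return js(f) and "config.js" in f
--
--     def icon(f):
--         return f.endswith((".png", ".jpg", ".jpeg", ".ico")) and not manifest(f)
--
--     def addin(f):
--         return (manifest(f)
--                 or (js(f) and "addin/" in f)
--                 or (html(f) and "addin/" in f)
--                 or icon(f)
--                 or (f.endswith(".css") and not manifest(f)))
--
--     return {
--         "manifest": any(manifest(f) for f in lows),
--         "js_files": any(js(f) for f in lows),
--         "html_files": any(html(f) for f in lows),
--         "config": any(config(f) for f in lows),
--         "icons": any(icon(f) for f in lows),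
--         "addin_assets": any(addin(f) for f in lows),
--     }
-- ===== Notes on version B (the rewrite author's own statement) =====
-- stated objective: alternative
-- what changed: Replaces the single stateful elif-chain loop over a mutable dict by six independent per-flag predicates evaluated with any() over the once-lowercased paths; the elif precedence is encoded in the predicates themselves.
import Mathlib
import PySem

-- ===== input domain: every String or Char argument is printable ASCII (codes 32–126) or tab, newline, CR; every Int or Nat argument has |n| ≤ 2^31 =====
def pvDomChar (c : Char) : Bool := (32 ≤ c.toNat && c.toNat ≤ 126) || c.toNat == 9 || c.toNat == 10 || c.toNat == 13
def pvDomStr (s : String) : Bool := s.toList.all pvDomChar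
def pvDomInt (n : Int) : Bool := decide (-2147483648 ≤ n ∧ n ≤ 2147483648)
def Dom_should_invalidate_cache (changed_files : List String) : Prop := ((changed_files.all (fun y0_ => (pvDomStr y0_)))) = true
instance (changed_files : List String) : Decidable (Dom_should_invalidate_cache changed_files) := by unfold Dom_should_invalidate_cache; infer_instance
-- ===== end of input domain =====

-- B replaces A's single stateful elif-chain loop over a mutable dict by six independent
-- per-flag any() predicates over the lowercased paths (objective: alternative decomposition).

-- ===== PORT A =====
-- one loop iteration of A: the elif chain mutating the dict
def sicStep (d : PySem.Dict String Bool) (file_path : String) : PySem.Dict String Bool :=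
  let l := PySem.Str.lower file_path
  if PySem.Str.isIn "manifest.xml" l then
    (d.insert "manifest" true).insert "addin_assets" true
  else if PySem.Str.endswith l ".js" then
    let d := d.insert "js_files" true
    let d := if PySem.Str.isIn "addin/" l then d.insert "addin_assets" true else d
    if PySem.Str.isIn "config.js" l then d.insert "config" true else d
  else if PySem.Str.endswith l ".html" then
    let d := d.insert "html_files" true
    if PySem.Str.isIn "addin/" l then d.insert "addin_assets" true else d
  else if PySem.Str.endswith l ".png" || PySem.Str.endswith l ".jpg" ||
          PySem.Str.endswith l ".jpeg" || PySem.Str.endswith l ".ico" then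
    (d.insert "icons" true).insert "addin_assets" true
  else if PySem.Str.endswith l ".css" then
    d.insert "addin_assets" true
  else d

def should_invalidate_cache (changed_files : List String) : List (String × Bool) :=
  (changed_files.foldl sicStep
    (PySem.Dict.ofList [("manifest", false), ("js_files", false), ("html_files", false),
                        ("config", false), ("icons", false), ("addin_assets", false)])).items

-- ===== PORT B =====
-- the per-flag predicates of Source B, on an already-lowercased path
def pvManifest (f : String) : Bool := PySem.Str.isIn "manifest.xml" f
def pvJs (f : String) : Bool := PySem.Str.endswith f ".js" && !pvManifest f
def pvHtml (f : String) : Bool := PySem.Str.endswith f ".html" && !pvManifest f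
def pvConfig (f : String) : Bool := pvJs f && PySem.Str.isIn "config.js" f
def pvIcon (f : String) : Bool :=
  (PySem.Str.endswith f ".png" || PySem.Str.endswith f ".jpg" ||
   PySem.Str.endswith f ".jpeg" || PySem.Str.endswith f ".ico") && !pvManifest f
def pvAddin (f : String) : Bool :=
  pvManifest f || (pvJs f && PySem.Str.isIn "addin/" f) || (pvHtml f && PySem.Str.isIn "addin/" f)
    || pvIcon f || (PySem.Str.endswith f ".css" && !pvManifest f)

def should_invalidate_cache_alt (changed_files : List String) : List (String × Bool) :=
  let lows := changed_files.map PySem.Str.lower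
  [("manifest", lows.any pvManifest), ("js_files", lows.any pvJs),
   ("html_files", lows.any pvHtml), ("config", lows.any pvConfig),
   ("icons", lows.any pvIcon), ("addin_assets", lows.any pvAddin)]

-- ===== PRECONDITION & SPEC =====
def Spec_should_invalidate_cache (changed_files : List String) (out : List (String × Bool)) : Prop := out = should_invalidate_cache_alt changed_files
instance (changed_files : List String) (out : List (String × Bool)) : Decidable (Spec_should_invalidate_cache changed_files out) := by unfold Spec_should_invalidate_cache; infer_instance

-- ===== CLAIM (what is proved, stated in full; the proofs are below) =====
def Claim_equal_should_invalidate_cache : Prop := ∀ (changed_files : List String), Dom_should_invalidate_cache changed_files → Spec_should_invalidate_cache changed_files (should_invalidate_cache changed_files)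

-- ===== LEMMAS AND PROOFS =====

-- the canonical shape of A's dict state throughout the loop
def sicCanon (m j h c i a : Bool) : PySem.Dict String Bool :=
  PySem.Dict.mk [("manifest", m), ("js_files", j), ("html_files", h),
                 ("config", c), ("icons", i), ("addin_assets", a)]

-- two distinct extensions cannot both be suffixes of the same string
lemma ew_excl (s : String) (a b : String)
    (hne : ¬ (a.toList <:+ b.toList ∨ b.toList <:+ a.toList))
    (ha : PySem.Str.endswith s a = true) : PySem.Str.endswith s b = false := by
  by_contra hb
  rw [Bool.not_eq_false] at hb
  simp only [PySem.Str.endswith_eq, PySem.Chars.endswith_iff] at ha hb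
  exact hne (List.suffix_or_suffix_of_suffix ha hb)

lemma sicStep_canon (m j h c i a : Bool) (f : String) :
    sicStep (sicCanon m j h c i a) f =
    sicCanon (m || pvManifest (PySem.Str.lower f)) (j || pvJs (PySem.Str.lower f))
             (h || pvHtml (PySem.Str.lower f)) (c || pvConfig (PySem.Str.lower f))
             (i || pvIcon (PySem.Str.lower f)) (a || pvAddin (PySem.Str.lower f)) := by
  unfold sicStep
  generalize PySem.Str.lower f = l
  by_cases hM : PySem.Str.isIn "manifest.xml" l = true
  · simp_all [sicCanon, pvManifest, pvJs, pvHtml, pvConfig, pvIcon, pvAddin,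
              PySem.Dict.insert, PySem.Dict.contains]
  · by_cases hJ : PySem.Str.endswith l ".js" = true
    · have hH := ew_excl l ".js" ".html" (by decide) hJ
      have hP := ew_excl l ".js" ".png" (by decide) hJ
      have hG := ew_excl l ".js" ".jpg" (by decide) hJ
      have hE := ew_excl l ".js" ".jpeg" (by decide) hJ
      have hI := ew_excl l ".js" ".ico" (by decide) hJ
      have hC := ew_excl l ".js" ".css" (by decide) hJ
      by_cases hA : PySem.Str.isIn "addin/" l = true <;>
        by_cases hCf : PySem.Str.isIn "config.js" l = true <;>
          simp_all [sicCanon, pvManifest, pvJs, pvHtml, pvConfig, pvIcon, pvAddin,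
                    PySem.Dict.insert, PySem.Dict.contains]
    · by_cases hH : PySem.Str.endswith l ".html" = true
      · have hP := ew_excl l ".html" ".png" (by decide) hH
        have hG := ew_excl l ".html" ".jpg" (by decide) hH
        have hE := ew_excl l ".html" ".jpeg" (by decide) hH
        have hI := ew_excl l ".html" ".ico" (by decide) hH
        have hC := ew_excl l ".html" ".css" (by decide) hH
        by_cases hA : PySem.Str.isIn "addin/" l = true <;>
          simp_all [sicCanon, pvManifest, pvJs, pvHtml, pvConfig, pvIcon, pvAddin,
                    PySem.Dict.insert, PySem.Dict.contains]
      · by_cases hIc : (PySem.Str.endswith l ".png" || PySem.Str.endswith l ".jpg" ||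
                        PySem.Str.endswith l ".jpeg" || PySem.Str.endswith l ".ico") = true
        · simp_all [sicCanon, pvManifest, pvJs, pvHtml, pvConfig, pvIcon, pvAddin,
                    PySem.Dict.insert, PySem.Dict.contains]
        · by_cases hC : PySem.Str.endswith l ".css" = true <;>
            simp_all [sicCanon, pvManifest, pvJs, pvHtml, pvConfig, pvIcon, pvAddin,
                      PySem.Dict.insert, PySem.Dict.contains]
lemma sicFold_canon (lst : List String) (m j h c i a : Bool) :
    lst.foldl sicStep (sicCanon m j h c i a) =
    sicCanon (m || (lst.map PySem.Str.lower).any pvManifest)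
             (j || (lst.map PySem.Str.lower).any pvJs)
             (h || (lst.map PySem.Str.lower).any pvHtml)
             (c || (lst.map PySem.Str.lower).any pvConfig)
             (i || (lst.map PySem.Str.lower).any pvIcon)
             (a || (lst.map PySem.Str.lower).any pvAddin) := by
  induction lst generalizing m j h c i a with
  | nil => simp
  | cons x xs ih =>
      simp only [List.foldl_cons, sicStep_canon, ih, List.map_cons, List.any_cons, Bool.or_assoc]

-- ===== VERDICT (by name: the statement is the Claim_ definition above) =====
theorem should_invalidate_cache_spec : Claim_equal_should_invalidate_cache := by
  intro changed_files _
  show should_invalidate_cache changed_files = should_invalidate_cache_alt changed_files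
  have h0 : PySem.Dict.ofList [("manifest", false), ("js_files", false), ("html_files", false),
            ("config", false), ("icons", false), ("addin_assets", false)] =
         sicCanon false false false false false false := by decide
  unfold should_invalidate_cache should_invalidate_cache_alt
  rw [h0, sicFold_canon]
  simp [sicCanon, List.any_map]
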